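-- pv_equiv track=rewrite | github.com/sugwanlee/Python-boot | 프로그래머스/0/181918. 배열 만들기 4/배열 만들기 4.py | solution
-- ===== SOURCE A (Python) =====
-- def solution(arr):
--     stk = []
--     i = 0
--     while len(arr) != i:
--         if stk == []:
--             stk.append(arr[i])
--             i += 1
--         elif stk[-1] < arr[i]:
--             stk.append(arr[i])
--             i += 1
--         elif stk[-1] >= arr[i]:
--             del stk[-1]
--     return stk
-- ===== SOURCE B (Python) =====
-- def solution(arr):
--     res = []
--     suffmin = None
--     for x in reversed(arr):
--         if suffmin is None or x < suffmin:
--             res.append(x)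
--             suffmin = x
--     res.reverse()
--     return res
-- ===== Notes on version B (the rewrite author's own statement) =====
-- stated objective: faster
-- what changed: Replaced the push/pop stack simulation with a single right-to-left pass keeping each element iff it is below the running suffix minimum, then reversing the collected list; no stack mutation or re-popping.
import Mathlib
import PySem

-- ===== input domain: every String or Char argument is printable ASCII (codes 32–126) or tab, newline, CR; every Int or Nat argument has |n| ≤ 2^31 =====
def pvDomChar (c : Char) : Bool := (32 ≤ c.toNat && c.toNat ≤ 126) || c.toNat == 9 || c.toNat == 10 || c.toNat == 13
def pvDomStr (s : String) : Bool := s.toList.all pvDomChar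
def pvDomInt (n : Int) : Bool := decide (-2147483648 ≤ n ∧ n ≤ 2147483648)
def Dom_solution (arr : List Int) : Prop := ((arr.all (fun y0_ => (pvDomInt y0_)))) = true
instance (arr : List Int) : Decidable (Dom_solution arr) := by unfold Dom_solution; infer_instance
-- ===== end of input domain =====

-- B replaces A's push/pop stack scan by one right-to-left suffix-minimum pass (constant-factor faster: no stack mutation / re-popping).

-- ===== PORT A =====
-- literal transliteration of A's while loop: stack kept in Python order (append / stk[-1] / del stk[-1] at the end)
def solLoop (arr : List Int) (stk : List Int) (i : Nat) : List Int :=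
  if h : i < arr.length then
    match hl : stk.getLast? with
    | none => solLoop arr (stk ++ [arr[i]]) (i + 1)
    | some t =>
      if t < arr[i] then solLoop arr (stk ++ [arr[i]]) (i + 1)
      else solLoop arr stk.dropLast i
  else stk
termination_by 2 * (arr.length - i) + stk.length
decreasing_by
  · simp only [List.length_append, List.length_cons, List.length_nil]; omega
  · simp only [List.length_append, List.length_cons, List.length_nil]; omega
  · have hne : stk ≠ [] := by intro hc; subst hc; simp at hl
    have : stk.length ≠ 0 := by simpa [List.length_eq_zero_iff] using hne
    simp only [List.length_dropLast]; omega

def solution (arr : List Int) : List Int := solLoop arr [] 0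

-- ===== PORT B =====
-- 'suffmin is None or x < suffmin'
def ltmB : Option Int → Int → Bool
  | none, _ => true
  | some v, x => decide (x < v)

-- the for-loop over reversed(arr), appending to res
def antLoop : List Int → Option Int → List Int → List Int
  | [], _, res => res
  | x :: rest, m, res =>
    if ltmB m x then antLoop rest (some x) (res ++ [x]) else antLoop rest m res

def solution_alt (arr : List Int) : List Int := (antLoop arr.reverse none []).reverse

-- ===== PRECONDITION & SPEC =====
def Spec_solution (arr : List Int) (out : List Int) : Prop := out = solution_alt arr
instance (arr : List Int) (out : List Int) : Decidable (Spec_solution arr out) := by unfold Spec_solution; infer_instance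

-- ===== CLAIM (what is proved, stated in full; the proofs are below) =====
def Claim_equal_solution : Prop := ∀ (arr : List Int), Dom_solution arr → Spec_solution arr (solution arr)

-- ===== LEMMAS AND PROOFS =====

-- common characterization: keep x iff x is below every later element and below the right bound m
def minm (m : Option Int) (x : Int) : Option Int := if ltmB m x then some x else m

def Sb : List Int → Option Int → List Int
  | [], _ => []
  | x :: xs, m => if (xs.all (fun y => decide (x < y)) && ltmB m x) then x :: Sb xs m else Sb xs m

lemma ltmB_minm (m : Option Int) (x y : Int) :
    ltmB (minm m x) y = (decide (y < x) && ltmB m y) := by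
  cases m with
  | none => simp [minm, ltmB]
  | some v =>
    simp only [minm, ltmB]
    by_cases h : x < v
    · rw [if_pos (by simpa [ltmB] using h)]
      by_cases hy : y < x
      · simp [hy, show y < v by omega]
      · simp [hy]
    · rw [if_neg (by simpa [ltmB] using h)]
      by_cases hy : y < v
      · simp [hy, show y < x by omega]
      · simp [hy]

lemma Sb_append (q : List Int) (x : Int) (m : Option Int) :
    Sb (q ++ [x]) m = Sb q (minm m x) ++ (if ltmB m x then [x] else []) := by
  induction q with
  | nil =>
    by_cases h : ltmB m x <;> simp [Sb, h]
  | cons y q ih =>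
    simp only [List.cons_append, Sb, List.all_append, List.all_cons, List.all_nil,
      Bool.and_true, ih]
    rw [ltmB_minm]
    by_cases h1 : q.all (fun z => decide (y < z))
    · by_cases h2 : (y < x)
      · by_cases h3 : ltmB m y <;> simp [h1, h2, h3]
      · simp [h1, h2]
    · simp [h1]

lemma Sb_filter (p : List Int) (m : Option Int) (x : Int) :
    (Sb p m).filter (fun y => decide (y < x)) = Sb p (minm m x) := by
  induction p with
  | nil => simp [Sb]
  | cons y p ih =>
    simp only [Sb, ltmB_minm]
    by_cases h1 : p.all (fun z => decide (y < z))
    · by_cases h2 : ltmB m y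
      · by_cases h3 : y < x
        · simp [h1, h2, h3, ih]
        · simp [h1, h2, h3, ih]
      · simp [h1, h2, ih]
    · simp [h1, ih]

lemma Sb_subset {p : List Int} {m : Option Int} {y : Int} (hy : y ∈ Sb p m) : y ∈ p := by
  induction p with
  | nil => simp [Sb] at hy
  | cons z p ih =>
    simp only [Sb] at hy
    split at hy
    · rcases List.mem_cons.mp hy with h | h
      · simp [h]
      · exact List.mem_cons_of_mem _ (ih h)
    · exact List.mem_cons_of_mem _ (ih hy)

lemma Sb_chain (p : List Int) (m : Option Int) : List.IsChain (· < ·) (Sb p m) := by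
  induction p generalizing m with
  | nil => exact List.isChain_nil
  | cons x p ih =>
    simp only [Sb]
    split
    · rename_i hcond
      have hall : ∀ y ∈ p, x < y := by
        have := (Bool.and_eq_true _ _).mp hcond |>.1
        simpa using (List.all_eq_true.mp this)
      refine List.isChain_cons.mpr ⟨?_, ih m⟩
      intro z hz
      exact hall z (Sb_subset (List.mem_of_mem_head? hz))
    · exact ih m

lemma chain_le_last : ∀ {stk : List Int} {t y : Int},
    List.IsChain (· < ·) stk → stk.getLast? = some t → y ∈ stk → y ≤ t := by
  intro stk
  induction stk with
  | nil => intro t y _ _ hy; simp at hy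
  | cons a l ih =>
    intro t y hc hl hy
    cases l with
    | nil => simp at hl hy; omega
    | cons b l' =>
      rw [List.isChain_cons] at hc
      rw [List.getLast?_cons_cons] at hl
      rcases List.mem_cons.mp hy with h | h
      · subst h
        have hab : y < b := hc.1 b (by simp)
        have hb : b ≤ t := ih hc.2 hl (by simp)
        omega
      · exact ih hc.2 hl h

-- pop phase: from a strictly increasing stack, A pops everything ≥ arr[i] then pushes arr[i]
lemma popPhase (arr : List Int) (i : Nat) (h : i < arr.length) :
    ∀ k (stk : List Int), stk.length ≤ k → List.IsChain (· < ·) stk →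
      solLoop arr stk i = solLoop arr (stk.filter (fun y => decide (y < arr[i])) ++ [arr[i]]) (i + 1) := by
  intro k
  induction k with
  | zero =>
    intro stk hk _
    have : stk = [] := List.length_eq_zero_iff.mp (by omega)
    subst this
    rw [solLoop]
    simp [h]
  | succ k ih =>
    intro stk hk hc
    match hl : stk.getLast? with
    | none =>
      have : stk = [] := by cases stk with | nil => rfl | cons a l => simp at hl
      subst this
      rw [solLoop]; simp [h]
    | some t =>
      have hne : stk ≠ [] := by intro hc'; subst hc'; simp at hl
      rw [solLoop]
      simp only [h, dif_pos]
      split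
      · rename_i heq
        rw [hl] at heq; exact absurd heq (by simp)
      rename_i t' heq
      rw [hl] at heq
      injection heq with heq; subst heq
      by_cases ht : t < arr[i]
      · rw [if_pos ht]
        congr 1
        have : stk.filter (fun y => decide (y < arr[i])) = stk := by
          apply List.filter_eq_self.mpr
          intro y hy
          have := chain_le_last hc hl hy
          simp; omega
        rw [this]
      · rw [if_neg ht]
        have hsplit : stk = stk.dropLast ++ [t] :=
          (List.dropLast_append_getLast? t (by simp [hl])).symm
        have h0 : stk.length ≠ 0 := by simpa [List.length_eq_zero_iff] using hne
        have hlen : stk.dropLast.length ≤ k := by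
          simp only [List.length_dropLast]; omega
        have hc' : List.IsChain (· < ·) stk.dropLast :=
          hc.prefix ⟨[t], hsplit.symm⟩
        rw [ih stk.dropLast hlen hc']
        have hf : List.filter (fun y => decide (y < arr[i])) stk
            = List.filter (fun y => decide (y < arr[i])) stk.dropLast := by
          conv_lhs => rw [hsplit]
          rw [List.filter_append]
          simp [ht]
        rw [hf]

lemma solLoop_inv (arr : List Int) :
    ∀ d j, j + d = arr.length →
      solLoop arr (Sb (arr.take j) none) j = Sb arr none := by
  intro d
  induction d with
  | zero =>
    intro j hj
    rw [solLoop]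
    simp only [show ¬ j < arr.length by omega, dif_neg, not_false_iff]
    rw [List.take_of_length_le (by omega)]
  | succ d ih =>
    intro j hj
    have hjlt : j < arr.length := by omega
    rw [popPhase arr j hjlt (Sb (arr.take j) none).length _ le_rfl (Sb_chain _ _)]
    rw [Sb_filter]
    have : Sb (arr.take j) (minm none arr[j]) ++ [arr[j]] = Sb (arr.take (j+1)) none := by
      rw [List.take_add_one, List.getElem?_eq_getElem hjlt]
      simp only [Option.toList]
      rw [Sb_append]
      simp [ltmB]
    rw [this]
    exact ih (j+1) (by omega)

-- B side: the reverse pass accumulates exactly (Sb l.reverse m).reverse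
lemma antLoop_eq (l : List Int) :
    ∀ (m : Option Int) (res : List Int),
      antLoop l m res = res ++ (Sb l.reverse m).reverse := by
  induction l with
  | nil => intro m res; simp [antLoop, Sb]
  | cons x rest ih =>
    intro m res
    simp only [antLoop, List.reverse_cons, Sb_append, List.reverse_append]
    by_cases h : ltmB m x
    · rw [if_pos h, ih]
      simp [minm, h]
    · rw [if_neg h, ih]
      simp [minm, h]

-- ===== VERDICT (by name: the statement is the Claim_ definition above) =====
theorem solution_spec : Claim_equal_solution := by
  intro arr _
  unfold Spec_solution solution solution_alt
  rw [antLoop_eq, List.reverse_reverse]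
  simp only [List.nil_append, List.reverse_reverse]
  have h0 : Sb (arr.take 0) none = [] := by simp [Sb]
  rw [← h0]
  exact solLoop_inv arr arr.length 0 (by omega)
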